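-- pv_equiv track=rewrite | github.com/kofk11317/AlgorithmStudy | 프로그래머스/lv2/131127. 할인 행사/할인 행사.py | solution
-- ===== SOURCE A (Python) =====
-- def solution(want, number, discount):
--
--     from collections import Counter
--
--     result=0
--     cnt=dict(zip(want,number))
--     length=len(discount)
--
--
--     for i in range (length):
--         new=(discount[i:i+10])
--         frequency_dict = dict(Counter(new)) # 리스트를 딕셔너리로 바꾸는법
--         if cnt==frequency_dict:
--             result+=1
--     return result
-- ===== SOURCE B (Python) =====
-- # B: sliding-window incremental counts with mismatch-count tracking -- one add/remove
-- # per step instead of rebuilding and comparing a Counter for every window.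
--
-- def _mism(target, k, c):
--     # does count c at key k disagree with the wanted dict?
--     t = target.get(k)
--     if t is None:
--         return c > 0
--     return c != t or c <= 0
--
--
-- def solution(want, number, discount):
--     target = dict(zip(want, number))
--     n = len(discount)
--     window = {}
--     bad = len(target)
--     for x in discount[:10]:
--         c = window.get(x, 0)
--         bad += _mism(target, x, c + 1) - _mism(target, x, c)
--         window[x] = c + 1
--     result = 0
--     for i in range(n):
--         if bad == 0:
--             result += 1
--         x = discount[i]
--         c = window.get(x, 0)
--         bad += _mism(target, x, c - 1) - _mism(target, x, c)
--         window[x] = c - 1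
--         if i + 10 < n:
--             y = discount[i + 10]
--             c = window.get(y, 0)
--             bad += _mism(target, y, c + 1) - _mism(target, y, c)
--             window[y] = c + 1
--     return result
-- ===== Notes on version B (the rewrite author's own statement) =====
-- stated objective: faster
-- what changed: Instead of rebuilding a Counter of each 10-item slice and comparing whole dicts per position, B slides a window updating one count on entry/exit and maintains the number of keys whose count mismatches the wanted dict, so each step tests bad == 0.
import Mathlib
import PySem

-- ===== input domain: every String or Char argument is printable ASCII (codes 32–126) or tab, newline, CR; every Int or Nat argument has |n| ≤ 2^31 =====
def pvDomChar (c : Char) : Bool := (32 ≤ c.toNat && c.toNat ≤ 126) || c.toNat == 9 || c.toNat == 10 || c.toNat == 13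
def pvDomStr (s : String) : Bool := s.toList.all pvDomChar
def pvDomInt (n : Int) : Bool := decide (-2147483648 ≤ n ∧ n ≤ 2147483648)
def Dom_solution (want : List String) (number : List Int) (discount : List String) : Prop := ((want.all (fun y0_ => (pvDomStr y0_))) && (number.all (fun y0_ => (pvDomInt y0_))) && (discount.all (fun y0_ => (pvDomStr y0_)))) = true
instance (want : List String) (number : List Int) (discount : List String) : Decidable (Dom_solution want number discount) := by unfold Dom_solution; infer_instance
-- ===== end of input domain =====

-- B replaces A's per-window Counter rebuild + dict comparison by a sliding window that
-- updates one count per step and tracks the number of mismatching keys (objective: faster).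

-- ===== PORT A =====
-- Python's `d1 == d2` on dicts: same key set and same value at every key (order-insensitive).
def pyDictEq (d1 d2 : PySem.Dict String Int) : Bool :=
  PySem.Set.equal d1.keys d2.keys && d1.keys.all (fun k => d1.get? k == d2.get? k)

def solution (want : List String) (number : List Int) (discount : List String) : Int :=
  let cnt := PySem.Dict.ofList (want.zip number)
  let length : Int := discount.length
  (PySem.List.pyRange 0 length 1).foldl (fun result i =>
    let new := PySem.List.slice discount (some i) (some (i + 10))
    let frequency_dict := PySem.Dict.counter new
    if pyDictEq cnt frequency_dict then result + 1 else result) 0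

-- ===== PORT B =====
-- int(b) for a Python bool used in arithmetic
def bint (b : Bool) : Int := if b then 1 else 0

-- port of _mism
def mismB (target : PySem.Dict String Int) (k : String) (c : Int) : Bool :=
  match target.get? k with
  | none => decide (c > 0)
  | some t => decide (c ≠ t) || decide (c ≤ 0)

def solution_alt (want : List String) (number : List Int) (discount : List String) : Int :=
  let target := PySem.Dict.ofList (want.zip number)
  let n : Int := discount.length
  let s0 : PySem.Dict String Int × Int :=
    (PySem.List.slice discount none (some 10)).foldl
      (fun s x =>
        let c := s.1.getD x 0
        (s.1.insert x (c + 1),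
         s.2 + bint (mismB target x (c + 1)) - bint (mismB target x c)))
      (PySem.Dict.empty, (target.size : Int))
  let r : Int × PySem.Dict String Int × Int :=
    (PySem.List.pyRange 0 n 1).foldl
      (fun s i =>
        let result := if s.2.2 == 0 then s.1 + 1 else s.1
        let x := PySem.List.pyGetD discount i ""
        let c := s.2.1.getD x 0
        let bad := s.2.2 + bint (mismB target x (c - 1)) - bint (mismB target x c)
        let window := s.2.1.insert x (c - 1)
        if i + 10 < n then
          let y := PySem.List.pyGetD discount (i + 10) ""
          let c2 := window.getD y 0
          (result, window.insert y (c2 + 1),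
           bad + bint (mismB target y (c2 + 1)) - bint (mismB target y c2))
        else
          (result, window, bad))
      (0, s0.1, s0.2)
  r.1

-- ===== PRECONDITION & SPEC =====
def Spec_solution (want : List String) (number : List Int) (discount : List String) (out : Int) : Prop := out = solution_alt want number discount
instance (want : List String) (number : List Int) (discount : List String) (out : Int) : Decidable (Spec_solution want number discount out) := by unfold Spec_solution; infer_instance

-- ===== CLAIM (what is proved, stated in full; the proofs are below) =====
def Claim_equal_solution : Prop := ∀ (want : List String) (number : List Int) (discount : List String), Dom_solution want number discount → Spec_solution want number discount (solution want number discount)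

-- ===== LEMMAS AND PROOFS =====

-- the per-window match predicate both programs decide
def Mwin (cnt : PySem.Dict String Int) (discount : List String) (i : Int) : Bool :=
  pyDictEq cnt (PySem.Dict.counter (PySem.List.slice discount (some i) (some (i + 10))))

-- mismatch count over a fixed key universe U for window counts f
def badSpec (target : PySem.Dict String Int) (U : List String) (f : String → Int) : Int :=
  (U.countP (fun k => mismB target k (f k)) : Int)

lemma foldl_count_ite (p : Int → Bool) (l : List Int) (init : Int) :
    l.foldl (fun acc i => if p i then acc + 1 else acc) init = init + l.countP p := by
  induction l generalizing init with
  | nil => simp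
  | cons a l ih => by_cases h : p a <;> simp [List.countP_cons, h, ih] <;> omega

lemma countP_mem {α} [DecidableEq α] (U tk : List α) (hU : U.Nodup) (htk : tk.Nodup)
    (hsub : ∀ x ∈ tk, x ∈ U) :
    U.countP (fun k => decide (k ∈ tk)) = tk.length := by
  rw [List.countP_eq_length_filter]
  have hperm : List.Perm (U.filter (fun k => decide (k ∈ tk))) tk := by
    rw [List.perm_ext_iff_of_nodup (hU.filter _) htk]
    intro a
    simp only [List.mem_filter, decide_eq_true_eq]
    exact ⟨fun h => h.2, fun h => ⟨hsub a h, h⟩⟩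
  exact hperm.length_eq

lemma countP_update {α} (U : List α) (hU : U.Nodup) (p q : α → Bool) (x : α) (hx : x ∈ U)
    (h : ∀ k ∈ U, k ≠ x → q k = p k) :
    (U.countP q : Int) = (U.countP p : Int) + bint (q x) - bint (p x) := by
  induction U with
  | nil => simp at hx
  | cons a U ih =>
    have hnd : a ∉ U ∧ U.Nodup := by simpa using hU
    rcases List.mem_cons.mp hx with rfl | hxU
    · have hcong : U.countP q = U.countP p :=
        List.countP_congr (fun k hk => by
          rw [h k (List.mem_cons_of_mem _ hk) (fun he => hnd.1 (he ▸ hk))])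
      rw [List.countP_cons, List.countP_cons, hcong]
      cases hq : q x <;> cases hp : p x <;> simp [bint, hq, hp] <;> omega
    · have ha : q a = p a := h a (List.mem_cons_self) (fun he => hnd.1 (he ▸ hxU))
      have := ih hnd.2 hxU (fun k hk => h k (List.mem_cons_of_mem _ hk))
      rw [List.countP_cons, List.countP_cons, ha]
      cases hp : p a <;> simp [hp] at this ⊢ <;> push_cast <;> omega

lemma get?_counter (ws : List String) (k : String) :
    (PySem.Dict.counter ws).get? k =
      if ws.count k = 0 then none else some (ws.count k : Int) := by
  by_cases hk : k ∈ ws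
  · have hc : ws.count k ≠ 0 := by simpa [Nat.pos_iff_ne_zero] using List.count_pos_iff.mpr hk
    rw [if_neg hc]
    cases hg : (PySem.Dict.counter ws).get? k with
    | none =>
      exact absurd (by simpa [PySem.Dict.keys_counter, PySem.Set.mem_ofList] using
        ((PySem.Dict.get?_eq_none_iff_not_mem_keys _ _).mp hg)) (by simp [hk])
    | some v =>
      have h1 : (PySem.Dict.counter ws).getD k 0 = v := PySem.Dict.getD_of_get?_eq_some _ 0 hg
      have h2 := PySem.Dict.getD_counter (xs := ws) (v := k)
      rw [h1] at h2; rw [h2]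
  · have hc : ws.count k = 0 := List.count_eq_zero.mpr hk
    rw [if_pos hc]
    exact (PySem.Dict.get?_eq_none_iff_not_mem_keys _ _).mpr
      (by simp [PySem.Dict.keys_counter, PySem.Set.mem_ofList, hk])

lemma mismB_false (target : PySem.Dict String Int) (k : String) (c : Int) :
    mismB target k c = false ↔ (match target.get? k with
      | none => c ≤ 0
      | some t => c = t ∧ 0 < c) := by
  unfold mismB
  cases target.get? k with
  | none => simp
  | some t => simp [not_le]

lemma match_iff (target : PySem.Dict String Int) (U : List String) (hU : U.Nodup)
    (hkeys : ∀ k ∈ target.keys, k ∈ U) (ws : List String) (hws : ∀ x ∈ ws, x ∈ U) :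
    (badSpec target U (fun k => (ws.count k : Int)) = 0) ↔
      (pyDictEq target (PySem.Dict.counter ws) = true) := by
  have hmemget : ∀ k, k ∈ target.keys ↔ target.get? k ≠ none := by
    intro k
    constructor
    · intro hk hn; exact ((PySem.Dict.get?_eq_none_iff_not_mem_keys _ _).mp hn) hk
    · intro hn; by_contra hk
      exact hn ((PySem.Dict.get?_eq_none_iff_not_mem_keys _ _).mpr hk)
  have hall : (badSpec target U (fun k => (ws.count k : Int)) = 0) ↔
      ∀ k, mismB target k (ws.count k : Int) = false := by
    unfold badSpec
    rw [show ((U.countP (fun k => mismB target k ((ws.count k : Int))) : Int) = 0) ↔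
        (U.countP (fun k => mismB target k ((ws.count k : Int))) = 0) by exact_mod_cast Iff.rfl]
    rw [List.countP_eq_zero]
    constructor
    · intro h k
      by_cases hk : k ∈ U
      · simpa using h k hk
      · have h1 : target.get? k = none :=
          (PySem.Dict.get?_eq_none_iff_not_mem_keys _ _).mpr (fun hm => hk (hkeys k hm))
        have h2 : ws.count k = 0 := List.count_eq_zero.mpr (fun hm => hk (hws k hm))
        simp [mismB, h1, h2]
    · intro h k _; simp [h k]
  rw [hall]
  unfold pyDictEq
  rw [Bool.and_eq_true, PySem.Set.equal_iff, List.all_eq_true]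
  constructor
  · intro h
    have hks : ∀ x, x ∈ target.keys ↔ x ∈ (PySem.Dict.counter ws).keys := by
      intro x
      rw [PySem.Dict.keys_counter, PySem.Set.mem_ofList]
      constructor
      · intro hx
        rcases hg : target.get? x with _ | t
        · exact absurd hg ((hmemget x).mp hx)
        · have := (mismB_false target x _).mp (h x)
          rw [hg] at this
          have : (0:Int) < (ws.count x : Int) := by
            simpa using this.2
          exact List.count_pos_iff.mp (by exact_mod_cast this)
      · intro hx
        rw [hmemget]
        intro hn
        have := (mismB_false target x _).mp (h x)
        rw [hn] at this
        have hc : 0 < ws.count x := List.count_pos_iff.mpr hx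
        simp at this; omega
    refine ⟨hks, ?_⟩
    intro k hk
    rcases hg : target.get? k with _ | t
    · exact absurd hg ((hmemget k).mp hk)
    · have hm := (mismB_false target k _).mp (h k)
      rw [hg] at hm
      have hcpos : ws.count k ≠ 0 := by
        have : (0:Int) < (ws.count k : Int) := hm.2
        exact_mod_cast this.ne'
      rw [get?_counter, if_neg hcpos, hm.1]
      simp
  · rintro ⟨hks, hval⟩ k
    rw [mismB_false]
    rcases hg : target.get? k with _ | t
    · have hk : k ∉ target.keys := (PySem.Dict.get?_eq_none_iff_not_mem_keys _ _).mp hg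
      have hkw : k ∉ ws := by
        intro hw
        exact hk ((hks k).mpr (by rw [PySem.Dict.keys_counter, PySem.Set.mem_ofList]; exact hw))
      simp [List.count_eq_zero.mpr hkw]
    · have hk : k ∈ target.keys := (hmemget k).mpr (by simp [hg])
      have hkw : k ∈ ws := by
        have := (hks k).mp hk
        rwa [PySem.Dict.keys_counter, PySem.Set.mem_ofList] at this
      have hc : ws.count k ≠ 0 := Nat.pos_iff_ne_zero.mp (List.count_pos_iff.mpr hkw)
      have := hval k hk
      rw [hg, get?_counter, if_neg hc] at this
      have ht : t = (ws.count k : Int) := by simpa using this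
      constructor
      · exact ht.symm
      · exact_mod_cast Nat.pos_of_ne_zero hc

lemma badSpec_zero (target : PySem.Dict String Int) (U : List String) (hU : U.Nodup)
    (htk : target.keys.Nodup) (hkeys : ∀ k ∈ target.keys, k ∈ U) :
    badSpec target U (fun _ => 0) = (target.size : Int) := by
  unfold badSpec
  have h1 : (U.countP (fun k => mismB target k 0)) =
      (U.countP (fun k => decide (k ∈ target.keys))) := by
    apply List.countP_congr
    intro k _
    rcases hg : target.get? k with _ | t
    · simp [mismB, hg, (PySem.Dict.get?_eq_none_iff_not_mem_keys _ _).mp hg]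
    · have hk : k ∈ target.keys := by
        by_contra hk
        rw [(PySem.Dict.get?_eq_none_iff_not_mem_keys _ _).mpr hk] at hg; cases hg
      simp [mismB, hg, hk]
  rw [h1, countP_mem U target.keys hU htk hkeys]
  simp [PySem.Dict.size, PySem.Dict.keys]

lemma addLoop (target : PySem.Dict String Int) (U : List String) (hU : U.Nodup)
    (ws : List String) (hws : ∀ x ∈ ws, x ∈ U)
    (W : PySem.Dict String Int) (b : Int) (g : String → Int)
    (hW : ∀ k, W.getD k 0 = g k) (hb : b = badSpec target U g) :
    (∀ k, (ws.foldl (fun s x =>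
        let c := s.1.getD x 0
        (s.1.insert x (c + 1),
         s.2 + bint (mismB target x (c + 1)) - bint (mismB target x c))) (W, b)).1.getD k 0
        = g k + (ws.count k : Int)) ∧
    (ws.foldl (fun s x =>
        let c := s.1.getD x 0
        (s.1.insert x (c + 1),
         s.2 + bint (mismB target x (c + 1)) - bint (mismB target x c))) (W, b)).2
        = badSpec target U (fun k => g k + (ws.count k : Int)) := by
  induction ws generalizing W b g with
  | nil => simpa using ⟨hW, hb⟩
  | cons x ws ih =>
    simp only [List.foldl_cons]
    have hc : W.getD x 0 = g x := hW x
    set g' : String → Int := fun k => if k = x then g x + 1 else g k with hg'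
    have hW' : ∀ k, (W.insert x (W.getD x 0 + 1)).getD k 0 = g' k := by
      intro k
      rw [PySem.Dict.getD_insert, hc, hg']
      by_cases hk : k = x <;> simp [hk, hW k]
    have hb' : b + bint (mismB target x (W.getD x 0 + 1)) - bint (mismB target x (W.getD x 0))
        = badSpec target U g' := by
      rw [hb, hc]
      unfold badSpec
      rw [countP_update U hU (fun k => mismB target k (g k)) (fun k => mismB target k (g' k))
        x (hws x List.mem_cons_self) (fun k _ hk => by simp [hg', hk])]
      simp [hg']
    have := ih (fun y hy => hws y (List.mem_cons_of_mem _ hy)) _ _ g' hW' hb'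
    refine ⟨fun k => ?_, ?_⟩
    · rw [this.1 k, hg']
      by_cases hk : k = x
      · subst hk; simp [List.count_cons]; ring
      · simp [hk, Ne.symm hk]
    · rw [this.2]
      congr 1
      funext k
      rw [hg']
      by_cases hk : k = x
      · subst hk; simp [List.count_cons]; ring
      · simp [hk, List.count_cons, Ne.symm hk]

-- the body of B's main loop, named for the proofs
def stepB (target : PySem.Dict String Int) (discount : List String) (n : Int)
    (s : Int × PySem.Dict String Int × Int) (i : Int) : Int × PySem.Dict String Int × Int :=
  let result := if s.2.2 == 0 then s.1 + 1 else s.1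
  let x := PySem.List.pyGetD discount i ""
  let c := s.2.1.getD x 0
  let bad := s.2.2 + bint (mismB target x (c - 1)) - bint (mismB target x c)
  let window := s.2.1.insert x (c - 1)
  if i + 10 < n then
    let y := PySem.List.pyGetD discount (i + 10) ""
    let c2 := window.getD y 0
    (result, window.insert y (c2 + 1),
     bad + bint (mismB target y (c2 + 1)) - bint (mismB target y c2))
  else
    (result, window, bad)

lemma slice_win (discount : List String) (i : Nat) :
    PySem.List.slice discount (some (i:Int)) (some ((i:Int) + 10)) = (discount.drop i).take 10 := by
  have h : ((i:Int) + 10) = (((i + 10 : Nat)) : Int) := by push_cast; ring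
  rw [h, PySem.List.slice_natCast]
  simp

lemma win_cons (discount : List String) (i : Nat) (hi : i < discount.length) :
    (discount.drop i).take 10 = discount[i] :: ((discount.drop (i+1)).take 9) := by
  rw [List.drop_eq_getElem_cons hi, show (10:Nat) = 9+1 from rfl, List.take_succ_cons]

lemma win_next (discount : List String) (i : Nat) :
    (discount.drop (i+1)).take 10 = (discount.drop (i+1)).take 9 ++ (discount[i+10]?.toList) := by
  rw [show (10:Nat) = 9+1 from rfl, List.take_add_one, List.getElem?_drop]

lemma mainLoop (target : PySem.Dict String Int) (discount U : List String) (hU : U.Nodup)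
    (hkeys : ∀ k ∈ target.keys, k ∈ U) (hdisc : ∀ x ∈ discount, x ∈ U) :
    ∀ (m i : Nat), discount.length ≤ i + m →
    ∀ (res : Int) (W : PySem.Dict String Int) (b : Int),
    (∀ k, W.getD k 0 = (((discount.drop i).take 10).count k : Int)) →
    b = badSpec target U (fun k => (((discount.drop i).take 10).count k : Int)) →
    ((PySem.List.pyRange (i:Int) (discount.length:Int) 1).foldl
        (stepB target discount (discount.length:Int)) (res, W, b)).1
      = res + (((PySem.List.pyRange (i:Int) (discount.length:Int) 1).countP
          (Mwin target discount) : Nat) : Int) := by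
  intro m
  induction m with
  | zero =>
    intro i hle res W b hW hb
    rw [PySem.List.pyRange_one_eq_nil (by exact_mod_cast hle)]
    simp
  | succ m ih =>
    intro i hle res W b hW hb
    by_cases hi : i < discount.length
    · rw [PySem.List.pyRange_one_cons (by exact_mod_cast hi)]
      simp only [List.foldl_cons, List.countP_cons]
      -- the members of the current window lie in U
      have hwsU : ∀ x ∈ (discount.drop i).take 10, x ∈ U := fun x hx =>
        hdisc x (List.mem_of_mem_drop (List.mem_of_mem_take hx))
      -- the bad-counter test decides exactly the window match
      have hb0 : ((b == 0) = Mwin target discount (i:Int)) := by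
        have hmi := match_iff target U hU hkeys ((discount.drop i).take 10) hwsU
        rw [← hb] at hmi
        cases hM : Mwin target discount (i:Int) with
        | true =>
          have : pyDictEq target (PySem.Dict.counter ((discount.drop i).take 10)) = true := by
            rw [Mwin, slice_win] at hM; exact hM
          simp [hmi.mpr this]
        | false =>
          have : b ≠ 0 := by
            intro h0
            rw [Mwin, slice_win] at hM
            rw [hmi.mp h0] at hM; cases hM
          simp [this]
      -- names for the pieces of the step
      have hxget : PySem.List.pyGetD discount (i:Int) "" = discount[i] := by
        rw [PySem.List.pyGetD_natCast]
        exact List.getD_eq_getElem discount "" hi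
      have hxU : discount[i] ∈ U := hdisc _ (List.getElem_mem hi)
      have hcount_cons : ∀ k, ((discount.drop i).take 10).count k
          = (if discount[i] = k then 1 else 0) + ((discount.drop (i+1)).take 9).count k := by
        intro k
        rw [win_cons discount i hi, List.count_cons]
        by_cases hk : k = discount[i] <;> simp [hk] <;> omega
      have hc : W.getD discount[i] 0 = (((discount.drop (i+1)).take 9).count discount[i] : Int) + 1 := by
        rw [hW, hcount_cons]
        simp
        push_cast; ring
      -- window after removing discount[i]
      have hW1 : ∀ k, (W.insert discount[i] (W.getD discount[i] 0 - 1)).getD k 0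
          = (((discount.drop (i+1)).take 9).count k : Int) := by
        intro k
        rw [PySem.Dict.getD_insert]
        by_cases hk : k = discount[i]
        · rw [if_pos hk, hc, hk]; ring
        · rw [if_neg hk, hW, hcount_cons, if_neg (fun h : discount[i] = k => hk h.symm)]
          push_cast; ring
      have key := countP_update U hU
          (fun k => mismB target k (((discount.drop i).take 10).count k : Int))
          (fun k => mismB target k (((discount.drop (i+1)).take 9).count k : Int))
          discount[i] hxU (fun k _ hk => by
            simp only [hcount_cons k, if_neg (fun h : discount[i] = k => hk h.symm)]
            norm_num)
      have hb1 : b + bint (mismB target discount[i] (W.getD discount[i] 0 - 1))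
            - bint (mismB target discount[i] (W.getD discount[i] 0))
          = badSpec target U (fun k => (((discount.drop (i+1)).take 9).count k : Int)) := by
        have e1 : (W.getD discount[i] 0 - 1)
            = (((discount.drop (i+1)).take 9).count discount[i] : Int) := by rw [hc]; ring
        have e2 : W.getD discount[i] 0 = (((discount.drop i).take 10).count discount[i] : Int) := hW _
        rw [hb, e1, e2]
        simp only [badSpec]
        rw [key]
      have hcast : ((i:Int) + 1) = (((i+1 : Nat)) : Int) := by push_cast; ring
      have hfin : ∀ r : Int, r = res + (if Mwin target discount (i:Int) then 1 else 0) →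
          r + (((PySem.List.pyRange ((i:Int)+1) (discount.length:Int) 1).countP
              (Mwin target discount) : Nat) : Int)
            = res + ((((PySem.List.pyRange ((i:Int)+1) (discount.length:Int) 1).countP
              (Mwin target discount) + if Mwin target discount (i:Int) then 1 else 0 : Nat)) : Int) := by
        intro r hr
        rw [hr]
        split <;> push_cast <;> ring
      by_cases h10 : (i:Int) + 10 < (discount.length : Int)
      · have h10n : i + 10 < discount.length := by exact_mod_cast h10
        have hyget : PySem.List.pyGetD discount ((i:Int)+10) "" = discount[i+10] := by
          rw [show ((i:Int)+10) = (((i+10 : Nat)) : Int) by push_cast; ring,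
            PySem.List.pyGetD_natCast]
          exact List.getD_eq_getElem discount "" h10n
        have hyU : discount[i+10] ∈ U := hdisc _ (List.getElem_mem h10n)
        have hnext : ∀ k, ((discount.drop (i+1)).take 10).count k
            = ((discount.drop (i+1)).take 9).count k + (if discount[i+10] = k then 1 else 0) := by
          intro k
          rw [win_next, List.getElem?_eq_getElem h10n]
          by_cases hk : k = discount[i+10] <;>
            simp [List.count_append, hk, List.count_cons]
        have hW2 : ∀ k, ((W.insert discount[i] (W.getD discount[i] 0 - 1)).insert discount[i+10]
              ((W.insert discount[i] (W.getD discount[i] 0 - 1)).getD discount[i+10] 0 + 1)).getD k 0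
            = (((discount.drop (i+1)).take 10).count k : Int) := by
          intro k
          rw [PySem.Dict.getD_insert]
          by_cases hk : k = discount[i+10]
          · rw [if_pos hk, hW1, hnext, hk]
            simp
          · rw [if_neg hk, hW1, hnext, if_neg (fun h : discount[i+10] = k => hk h.symm)]
            push_cast; ring
        have key2 := countP_update U hU
            (fun k => mismB target k (((discount.drop (i+1)).take 9).count k : Int))
            (fun k => mismB target k (((discount.drop (i+1)).take 10).count k : Int))
            discount[i+10] hyU (fun k _ hk => by
              simp only [hnext k, if_neg (fun h : discount[i+10] = k => hk h.symm)]
              norm_num)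
        have hb2 : (b + bint (mismB target discount[i] (W.getD discount[i] 0 - 1))
              - bint (mismB target discount[i] (W.getD discount[i] 0)))
              + bint (mismB target discount[i+10]
                  ((W.insert discount[i] (W.getD discount[i] 0 - 1)).getD discount[i+10] 0 + 1))
              - bint (mismB target discount[i+10]
                  ((W.insert discount[i] (W.getD discount[i] 0 - 1)).getD discount[i+10] 0))
            = badSpec target U (fun k => (((discount.drop (i+1)).take 10).count k : Int)) := by
          have e1 : (W.insert discount[i] (W.getD discount[i] 0 - 1)).getD discount[i+10] 0 + 1
              = (((discount.drop (i+1)).take 10).count discount[i+10] : Int) := by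
            rw [hW1, hnext]; simp
          have e2 : (W.insert discount[i] (W.getD discount[i] 0 - 1)).getD discount[i+10] 0
              = (((discount.drop (i+1)).take 9).count discount[i+10] : Int) := hW1 _
          rw [hb1, e1, e2]
          simp only [badSpec]
          rw [key2]
        have happ : stepB target discount (discount.length:Int) (res, W, b) (i:Int)
            = (if b == 0 then res + 1 else res,
               (W.insert discount[i] (W.getD discount[i] 0 - 1)).insert discount[i+10]
                 ((W.insert discount[i] (W.getD discount[i] 0 - 1)).getD discount[i+10] 0 + 1),
               (b + bint (mismB target discount[i] (W.getD discount[i] 0 - 1))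
                - bint (mismB target discount[i] (W.getD discount[i] 0)))
                + bint (mismB target discount[i+10]
                    ((W.insert discount[i] (W.getD discount[i] 0 - 1)).getD discount[i+10] 0 + 1))
                - bint (mismB target discount[i+10]
                    ((W.insert discount[i] (W.getD discount[i] 0 - 1)).getD discount[i+10] 0))) := by
          simp only [stepB, hxget, hyget, if_pos h10]
        rw [happ, hcast]
        rw [ih (i+1) (by omega) _ _ _ hW2 hb2]
        exact hfin _ (by rw [← hb0]; split <;> ring)
      · have hlen : discount.length ≤ i + 10 := by exact_mod_cast not_lt.mp h10
        have hsame : (discount.drop (i+1)).take 10 = (discount.drop (i+1)).take 9 := by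
          rw [List.take_of_length_le, List.take_of_length_le] <;> simp <;> omega
        have happ : stepB target discount (discount.length:Int) (res, W, b) (i:Int)
            = (if b == 0 then res + 1 else res,
               W.insert discount[i] (W.getD discount[i] 0 - 1),
               b + bint (mismB target discount[i] (W.getD discount[i] 0 - 1))
                - bint (mismB target discount[i] (W.getD discount[i] 0))) := by
          simp only [stepB, hxget, if_neg h10]
        rw [happ, hcast]
        rw [ih (i+1) (by omega) _ _ _ (by rw [hsame]; exact hW1) (by rw [hsame]; exact hb1)]
        exact hfin _ (by rw [← hb0]; split <;> ring)
    · rw [PySem.List.pyRange_one_eq_nil (by exact_mod_cast Nat.le_of_not_lt hi)]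
      simp

-- ===== VERDICT (by name: the statement is the Claim_ definition above) =====
theorem solution_spec : Claim_equal_solution := by
  unfold Claim_equal_solution
  intro want number discount _
  unfold Spec_solution
  have htake : PySem.List.slice discount none (some 10) = discount.take 10 := by
    rw [PySem.List.slice_to discount (by norm_num : (0:Int) ≤ 10)]
    rfl
  set target := PySem.Dict.ofList (want.zip number) with htarget
  set U := PySem.Set.ofList (target.keys ++ discount) with hUdef
  have hU : U.Nodup := PySem.Set.nodup_ofList _
  have hkeys : ∀ k ∈ target.keys, k ∈ U := fun k hk =>
    (PySem.Set.mem_ofList _ _).mpr (List.mem_append_left _ hk)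
  have hdisc : ∀ x ∈ discount, x ∈ U := fun x hx =>
    (PySem.Set.mem_ofList _ _).mpr (List.mem_append_right _ hx)
  have hA : solution want number discount
      = 0 + (((PySem.List.pyRange 0 (discount.length:Int) 1).countP
          (Mwin target discount) : Nat) : Int) := by
    unfold solution
    exact foldl_count_ite (Mwin target discount) _ 0
  have hadd := addLoop target U hU (discount.take 10)
    (fun x hx => hdisc x (List.mem_of_mem_take hx))
    PySem.Dict.empty (target.size : Int) (fun _ => 0)
    (fun k => PySem.Dict.getD_empty _ _)
    (badSpec_zero target U hU (PySem.Dict.nodup_keys_ofList _) hkeys).symm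
  have hmain := mainLoop target discount U hU hkeys hdisc discount.length 0 (by omega)
  have hB : solution_alt want number discount
      = 0 + (((PySem.List.pyRange 0 (discount.length:Int) 1).countP
          (Mwin target discount) : Nat) : Int) := by
    have h0 := hmain 0
      ((discount.take 10).foldl (fun s x =>
        let c := s.1.getD x 0
        (s.1.insert x (c + 1),
         s.2 + bint (mismB target x (c + 1)) - bint (mismB target x c)))
        (PySem.Dict.empty, (target.size : Int))).1
      ((discount.take 10).foldl (fun s x =>
        let c := s.1.getD x 0
        (s.1.insert x (c + 1),
         s.2 + bint (mismB target x (c + 1)) - bint (mismB target x c)))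
        (PySem.Dict.empty, (target.size : Int))).2
      (fun k => by rw [hadd.1 k]; simp)
      (by rw [hadd.2]; congr 1; funext k; simp)
    simp only [Nat.cast_zero] at h0
    unfold solution_alt
    rw [htake]
    exact h0
  rw [hA, hB]
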